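-- pv_equiv track=rewrite | github.com/pratik-dhayagude/Python_Practice | program25.py | DisplayFactors
-- ===== SOURCE A (Python) =====
-- def DisplayFactors(iNo):
--
--   iSum = 0
--   iSumFactors=0
--
--   for i in range(1,iNo+1):
--
--     if(int(iNo % i) != 0):
--
--       iSum = iSum + i
--
--
--   for i in range(1,iNo):
--
--     if(int(iNo % i) == 0):
--
--       iSumFactors = iSumFactors + i
--
--   return (iSumFactors - iSum)
-- ===== SOURCE B (Python) =====
-- def DisplayFactors(iNo):
--     # O(sqrt(n)): enumerate divisors in pairs up to sqrt(n); combine with Gauss sum.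
--     if iNo <= 0:
--         return 0
--     D = 0          # sum of all divisors of iNo in 1..iNo
--     d = 1
--     while d * d <= iNo:
--         if iNo % d == 0:
--             q = iNo // d
--             D += d
--             if q != d:
--                 D += q
--         d += 1
--     T = iNo * (iNo + 1) // 2
--     return 2 * D - iNo - T
-- ===== Notes on version B (the rewrite author's own statement) =====
-- stated objective: faster
-- what changed: Replaces the two O(n) scans (non-divisor sum and proper-divisor sum) by a single O(sqrt(n)) paired divisor enumeration up to sqrt(n) combined with the Gauss closed form n(n+1)/2, returning 2*sigma(n) - n - n(n+1)/2.
import Mathlib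
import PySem

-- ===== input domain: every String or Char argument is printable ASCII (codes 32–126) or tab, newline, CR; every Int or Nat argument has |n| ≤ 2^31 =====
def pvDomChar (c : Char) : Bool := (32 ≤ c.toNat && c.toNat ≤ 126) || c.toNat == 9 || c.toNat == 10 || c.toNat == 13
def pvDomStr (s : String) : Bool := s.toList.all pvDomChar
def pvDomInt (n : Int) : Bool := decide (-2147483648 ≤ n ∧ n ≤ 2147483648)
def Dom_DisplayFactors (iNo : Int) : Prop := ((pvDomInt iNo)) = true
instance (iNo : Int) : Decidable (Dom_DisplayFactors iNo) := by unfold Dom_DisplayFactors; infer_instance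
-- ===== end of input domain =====

-- B replaces A's two O(n) scans by one O(√n) paired divisor enumeration plus the Gauss
-- closed form n(n+1)//2 (objective: faster, asymptotically).


-- ===== PORT A =====
def DisplayFactors (iNo : Int) : Int :=
  let iSum := (PySem.List.pyRange 1 (iNo + 1) 1).foldl
    (fun s i => if PySem.Int.mod iNo i ≠ 0 then s + i else s) 0
  let iSumFactors := (PySem.List.pyRange 1 iNo 1).foldl
    (fun s i => if PySem.Int.mod iNo i = 0 then s + i else s) 0
  iSumFactors - iSum

-- ===== PORT B =====
-- the `while d * d <= iNo` loop of Source B; the Nat fuel only makes the loop total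
-- (iNo.toNat + 1 is more than enough iterations: the loop stops once d exceeds √iNo)
def DF_altLoop (iNo : Int) : Nat → Int → Int → Int
  | 0, _, D => D
  | k + 1, d, D =>
    if d * d ≤ iNo then
      DF_altLoop iNo k (d + 1)
        (if PySem.Int.mod iNo d = 0 then
          (let q := PySem.Int.floordiv iNo d
           if q ≠ d then D + d + q else D + d)
         else D)
    else D

def DisplayFactors_alt (iNo : Int) : Int :=
  if iNo ≤ 0 then 0
  else
    let D := DF_altLoop iNo (iNo.toNat + 1) 1 0
    let T := PySem.Int.floordiv (iNo * (iNo + 1)) 2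
    2 * D - iNo - T

-- ===== PRECONDITION & SPEC =====
def Spec_DisplayFactors (iNo : Int) (out : Int) : Prop := out = DisplayFactors_alt iNo
instance (iNo : Int) (out : Int) : Decidable (Spec_DisplayFactors iNo out) := by unfold Spec_DisplayFactors; infer_instance

-- ===== CLAIM (what is proved, stated in full; the proofs are below) =====
def Claim_equal_DisplayFactors : Prop := ∀ (iNo : Int), Dom_DisplayFactors iNo → Spec_DisplayFactors iNo (DisplayFactors iNo)

-- ===== LEMMAS AND PROOFS =====

-- sum of divisors of n over 1..n (as an Icc sum over ℤ)
noncomputable def DF_sigma (n : Int) : Int := ∑ e ∈ Finset.Icc (1:Int) n, if e ∣ n then e else 0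

-- partial pairing sum: divisors already collected by the √ loop when the counter is d
noncomputable def DF_S (n d : Int) : Int :=
  ∑ e ∈ Finset.Icc (1:Int) n, if e ∣ n ∧ (e < d ∨ n < e * d) then e else 0

lemma DF_Icc_insert (n : Int) (h : 1 ≤ n) :
    Finset.Icc (1:Int) n = insert n (Finset.Icc 1 (n-1)) := by
  ext x; simp [Finset.mem_Icc]; omega

-- a conditional-accumulation foldl is a sum of a map
lemma DF_foldl_if_sum (p : Int → Prop) [DecidablePred p] (l : List Int) (c : Int) :
    l.foldl (fun s i => if p i then s + i else s) c
      = c + (l.map (fun i => if p i then i else 0)).sum := by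
  induction l generalizing c with
  | nil => simp
  | cons x xs ih => by_cases hx : p x <;> simp [hx, ih] <;> ring

-- foldl over pyRange 1 m as an Icc sum
lemma DF_range_sum (p : Int → Prop) [DecidablePred p] (m : Int) :
    (PySem.List.pyRange 1 m 1).foldl (fun s i => if p i then s + i else s) 0
      = ∑ e ∈ Finset.Icc (1:Int) (m-1), if p e then e else 0 := by
  rw [DF_foldl_if_sum, zero_add]
  rw [← List.sum_toFinset _ (PySem.List.nodup_pyRange_one 1 m)]
  have hts : (PySem.List.pyRange 1 m 1).toFinset = Finset.Icc (1:Int) (m-1) := by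
    ext x; simp [PySem.List.mem_pyRange_one, Finset.mem_Icc]
  rw [hts]

-- Gauss: 2 · (sum of Icc 1 n) = n (n+1)
lemma DF_gauss_nat (k : Nat) :
    2 * (∑ e ∈ Finset.Icc (1:Int) (k:Int), e) = (k:Int) * ((k:Int) + 1) := by
  induction k with
  | zero => simp
  | succ m ih =>
    have h1 : (1:Int) ≤ (m:Int) + 1 := by omega
    rw [show ((m+1 : Nat) : Int) = (m:Int) + 1 by push_cast; ring]
    rw [DF_Icc_insert _ h1, Finset.sum_insert (by simp [Finset.mem_Icc])]
    rw [show (m:Int) + 1 - 1 = (m:Int) by ring]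
    rw [mul_add, ih]; ring

lemma DF_gauss (n : Int) (hn : 0 ≤ n) :
    2 * (∑ e ∈ Finset.Icc (1:Int) n, e) = n * (n + 1) := by
  have := DF_gauss_nat n.toNat
  rwa [Int.toNat_of_nonneg hn] at this

-- floordiv of the (even) product
lemma DF_gauss_floordiv (n : Int) (hn : 0 ≤ n) :
    PySem.Int.floordiv (n * (n + 1)) 2 = ∑ e ∈ Finset.Icc (1:Int) n, e := by
  have hg := DF_gauss n hn
  rw [PySem.Int.floordiv_eq_iff_of_pos (by omega)]
  omega

-- A's first loop
lemma DF_loop1 (n : Int) :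
    (PySem.List.pyRange 1 (n + 1) 1).foldl
        (fun s i => if PySem.Int.mod n i ≠ 0 then s + i else s) 0
      = (∑ e ∈ Finset.Icc (1:Int) n, e) - DF_sigma n := by
  rw [DF_range_sum (fun i => PySem.Int.mod n i ≠ 0) (n+1)]
  rw [show n + 1 - 1 = n by ring]
  unfold DF_sigma
  rw [← Finset.sum_sub_distrib]
  refine Finset.sum_congr rfl (fun e he => ?_)
  by_cases hdv : e ∣ n
  · simp [(PySem.Int.mod_eq_zero_iff_dvd n e).mpr hdv, hdv]
  · have : PySem.Int.mod n e ≠ 0 := fun h => hdv ((PySem.Int.mod_eq_zero_iff_dvd n e).mp h)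
    simp [this, hdv]

-- A's second loop
lemma DF_loop2 (n : Int) (hn : 1 ≤ n) :
    (PySem.List.pyRange 1 n 1).foldl
        (fun s i => if PySem.Int.mod n i = 0 then s + i else s) 0
      = DF_sigma n - n := by
  rw [DF_range_sum (fun i => PySem.Int.mod n i = 0) n]
  unfold DF_sigma
  rw [DF_Icc_insert n hn, Finset.sum_insert (by simp [Finset.mem_Icc])]
  have hself : (if (n:Int) ∣ n then n else 0) = n := by simp
  rw [hself]
  have : ∀ e ∈ Finset.Icc (1:Int) (n-1),
      (if PySem.Int.mod n e = 0 then e else 0) = (if e ∣ n then e else 0) := by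
    intro e he
    by_cases hdv : e ∣ n
    · simp [(PySem.Int.mod_eq_zero_iff_dvd n e).mpr hdv, hdv]
    · have : PySem.Int.mod n e ≠ 0 := fun h => hdv ((PySem.Int.mod_eq_zero_iff_dvd n e).mp h)
      simp [this, hdv]
  rw [Finset.sum_congr rfl this]
  ring

-- one step of the pairing sum
lemma DF_S_step (n d : Int) (hn : 1 ≤ n) (hd : 1 ≤ d) (hdd : d * d ≤ n) :
    DF_S n (d + 1)
      = DF_S n d + (if PySem.Int.mod n d = 0 then
          (let q := PySem.Int.floordiv n d
           if q ≠ d then d + q else d) else 0) := by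
  by_cases hdv : d ∣ n
  case neg =>
    -- d does not divide n: nothing is added and the index sets coincide
    have hm : PySem.Int.mod n d ≠ 0 := fun h => hdv ((PySem.Int.mod_eq_zero_iff_dvd n d).mp h)
    rw [if_neg hm, add_zero]
    unfold DF_S
    refine Finset.sum_congr rfl (fun e he => ?_)
    rw [Finset.mem_Icc] at he
    congr 1
    apply propext
    constructor
    · rintro ⟨hen, hcase⟩
      refine ⟨hen, ?_⟩
      by_cases h1 : e < d
      · exact Or.inl h1
      by_cases h2 : n < e * d
      · exact Or.inr h2
      exfalso
      rw [not_lt] at h1 h2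
      obtain ⟨m, hnm⟩ := hen
      rcases hcase with h3 | h3
      · have hed : e = d := by omega
        rw [hed] at hnm
        exact hdv ⟨m, hnm⟩
      · have hd1 : d ≤ m := by nlinarith
        have hd2 : m < d + 1 := by nlinarith
        have hmd : m = d := by omega
        rw [hmd] at hnm
        exact hdv ⟨e, by rw [hnm]; ring⟩
    · rintro ⟨hen, hcase⟩
      refine ⟨hen, ?_⟩
      rcases hcase with h | h
      · exact Or.inl (by omega)
      · exact Or.inr (by nlinarith)
  case pos =>
    have hm : PySem.Int.mod n d = 0 := (PySem.Int.mod_eq_zero_iff_dvd n d).mpr hdv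
    rw [if_pos hm]
    have hq0 : PySem.Int.floordiv n d = n / d :=
      PySem.Int.floordiv_eq_ediv_of_pos (show (0:Int) < d by omega)
    set q : Int := PySem.Int.floordiv n d with hqdef
    have hq : q * d = n := by rw [hq0]; exact Int.ediv_mul_cancel hdv
    have hqd : d ≤ q := by nlinarith
    have hq1 : 1 ≤ q := by omega
    have hqn : q ≤ n := by nlinarith
    have hdn : d ≤ n := by nlinarith
    -- pointwise decomposition of the new indicator
    have hpoint : ∀ e ∈ Finset.Icc (1:Int) n,
        (if e ∣ n ∧ (e < d + 1 ∨ n < e * (d + 1)) then e else 0)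
          = (if e ∣ n ∧ (e < d ∨ n < e * d) then e else 0)
            + ((if e = d then e else 0) + (if e = q ∧ q ≠ d then e else 0)) := by
      intro e he
      rw [Finset.mem_Icc] at he
      by_cases hed : e = d
      · have hP : ¬ (e ∣ n ∧ (e < d ∨ n < e * d)) := by
          rintro ⟨_, h | h⟩
          · omega
          · rw [hed] at h; omega
        have hP' : e ∣ n ∧ (e < d + 1 ∨ n < e * (d + 1)) := by
          refine ⟨by rw [hed]; exact hdv, Or.inl (by omega)⟩
        have hnq : ¬ (e = q ∧ q ≠ d) := by rintro ⟨h1, h2⟩; omega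
        rw [if_pos hP', if_neg hP, if_pos hed, if_neg hnq]
        omega
      by_cases heq : e = q
      · have hqd' : q ≠ d := by omega
        have hedn : e * d = n := by rw [heq]; omega
        have hP : ¬ (e ∣ n ∧ (e < d ∨ n < e * d)) := by
          rintro ⟨_, h | h⟩ <;> omega
        have hP' : e ∣ n ∧ (e < d + 1 ∨ n < e * (d + 1)) := by
          refine ⟨⟨d, by omega⟩, Or.inr (by nlinarith)⟩
        rw [if_pos hP', if_neg hP, if_neg hed, if_pos ⟨heq, hqd'⟩]
        omega
      · -- e is neither d nor q: the two conditions agree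
        have hiff : (e ∣ n ∧ (e < d + 1 ∨ n < e * (d + 1))) ↔ (e ∣ n ∧ (e < d ∨ n < e * d)) := by
          constructor
          · rintro ⟨hen, hcase⟩
            refine ⟨hen, ?_⟩
            by_cases h1 : e < d
            · exact Or.inl h1
            by_cases h2 : n < e * d
            · exact Or.inr h2
            exfalso
            rw [not_lt] at h1 h2
            obtain ⟨m, hnm⟩ := hen
            rcases hcase with h3 | h3
            · exact hed (by omega)
            · have hd1 : d ≤ m := by nlinarith
              have hd2 : m < d + 1 := by nlinarith
              have hmd : m = d := by omega
              rw [hmd] at hnm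
              have h5 : e * d = q * d := by omega
              exact heq (mul_right_cancel₀ (show (d:Int) ≠ 0 by omega) h5)
          · rintro ⟨hen, hcase⟩
            refine ⟨hen, ?_⟩
            rcases hcase with h | h
            · exact Or.inl (by omega)
            · exact Or.inr (by nlinarith)
        rw [if_congr hiff rfl rfl, if_neg hed,
          if_neg (show ¬ (e = q ∧ q ≠ d) by rintro ⟨h1, _⟩; exact heq h1)]
        omega
    unfold DF_S
    rw [Finset.sum_congr rfl hpoint, Finset.sum_add_distrib, Finset.sum_add_distrib]
    have hd_mem : d ∈ Finset.Icc (1:Int) n := by rw [Finset.mem_Icc]; omega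
    have hq_mem : q ∈ Finset.Icc (1:Int) n := by rw [Finset.mem_Icc]; omega
    have hsum_d : (∑ e ∈ Finset.Icc (1:Int) n, if e = d then e else 0) = d := by
      rw [Finset.sum_ite_eq' _ d (fun x => x), if_pos hd_mem]
    by_cases hqd' : q = d
    · have hz : ∀ e ∈ Finset.Icc (1:Int) n, (if e = q ∧ q ≠ d then e else 0) = 0 := by
        intro e _; simp [hqd']
      rw [Finset.sum_congr rfl hz, hsum_d]
      simp [hqd']
    · have hw : ∀ e ∈ Finset.Icc (1:Int) n,
          (if e = q ∧ q ≠ d then e else 0) = (if e = q then e else 0) := by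
        intro e _; by_cases h : e = q <;> simp [h, hqd']
      rw [Finset.sum_congr rfl hw, Finset.sum_ite_eq' _ q (fun x => x), if_pos hq_mem, hsum_d]
      simp [hqd']

-- once d*d exceeds n every divisor has been collected
lemma DF_S_full (n d : Int) (hd : 1 ≤ d) (hdd : n < d * d) :
    DF_S n d = DF_sigma n := by
  unfold DF_S DF_sigma
  refine Finset.sum_congr rfl (fun e he => ?_)
  rw [Finset.mem_Icc] at he
  have hiff : (e ∣ n ∧ (e < d ∨ n < e * d)) ↔ e ∣ n := by
    constructor
    · exact fun h => h.1
    · intro hen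
      refine ⟨hen, ?_⟩
      by_cases h1 : e < d
      · exact Or.inl h1
      · rw [not_lt] at h1
        exact Or.inr (by nlinarith)
  rw [if_congr hiff rfl rfl]

-- the √ loop computes σ(n) (given enough fuel)
lemma DF_altLoop_inv (k : Nat) : ∀ (n d : Int), 1 ≤ n → 1 ≤ d → (n + 1 - d).toNat ≤ k →
    DF_altLoop n k d (DF_S n d) = DF_sigma n := by
  induction k with
  | zero =>
    intro n d hn hd hk
    have hdn : n + 1 ≤ d := by omega
    exact DF_S_full n d hd (by nlinarith)
  | succ k ih =>
    intro n d hn hd hk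
    show (if d * d ≤ n then _ else _) = _
    by_cases hdd : d * d ≤ n
    · rw [if_pos hdd]
      have hdn : d ≤ n := by nlinarith
      have hbody : (if PySem.Int.mod n d = 0 then
            (let q := PySem.Int.floordiv n d
             if q ≠ d then DF_S n d + d + q else DF_S n d + d)
           else DF_S n d) = DF_S n (d + 1) := by
        rw [DF_S_step n d hn hd hdd]
        by_cases hfd : PySem.Int.floordiv n d = d <;>
          by_cases hm : PySem.Int.mod n d = 0 <;> simp [hfd, hm] <;> ring
      rw [hbody]
      exact ih n (d + 1) hn (by omega) (by omega)
    · rw [if_neg hdd]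
      rw [not_le] at hdd
      exact DF_S_full n d hd hdd

lemma DF_altLoop_sigma (n : Int) (hn : 1 ≤ n) :
    DF_altLoop n (n.toNat + 1) 1 0 = DF_sigma n := by
  have hS1 : DF_S n 1 = 0 := by
    unfold DF_S
    refine Finset.sum_eq_zero (fun e he => ?_)
    rw [Finset.mem_Icc] at he
    have hne : ¬ (e ∣ n ∧ (e < 1 ∨ n < e * 1)) := by rintro ⟨_, h | h⟩ <;> omega
    rw [if_neg hne]
  have := DF_altLoop_inv (n.toNat + 1) n 1 hn le_rfl (by omega)
  rwa [hS1] at this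

-- ===== VERDICT (by name: the statement is the Claim_ definition above) =====
theorem DisplayFactors_spec : Claim_equal_DisplayFactors := by
  intro n _
  unfold Spec_DisplayFactors DisplayFactors DisplayFactors_alt
  by_cases hn : n ≤ 0
  · have h1 : PySem.List.pyRange 1 (n+1) 1 = [] := PySem.List.pyRange_one_eq_nil (by omega)
    have h2 : PySem.List.pyRange 1 n 1 = [] := PySem.List.pyRange_one_eq_nil (by omega)
    simp [h1, h2, hn]
  · have hn1 : 1 ≤ n := by omega
    simp only [if_neg hn]
    rw [DF_loop1 n, DF_loop2 n hn1, DF_altLoop_sigma n hn1, DF_gauss_floordiv n (by omega)]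
    ring
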